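-- pv_equiv track=rewrite | github.com/rooz-live/agentic-flow | scripts/analysis/validate_dt_trajectories.py | horizon_histogram
-- ===== SOURCE A (Python) =====
-- from typing import Any, Dict, List, Optional, Tuple
--
-- def horizon_histogram(lengths: List[int]) -> Dict[str, int]:
--     buckets = {
--         "1-5": 0,
--         "6-10": 0,
--         "11-15": 0,
--         "16+": 0,
--     }
--     for L in lengths:
--         if L <= 5:
--             buckets["1-5"] += 1
--         elif L <= 10:
--             buckets["6-10"] += 1
--         elif L <= 15:
--             buckets["11-15"] += 1
--         else:
--             buckets["16+"] += 1
--     return buckets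
-- ===== SOURCE B (Python) =====
-- def horizon_histogram(lengths):
--     # staged cumulative counts, buckets by differencing (no per-element bucket choice)
--     c5 = sum(1 for L in lengths if L <= 5)
--     c10 = sum(1 for L in lengths if L <= 10)
--     c15 = sum(1 for L in lengths if L <= 15)
--     return {
--         "1-5": c5,
--         "6-10": c10 - c5,
--         "11-15": c15 - c10,
--         "16+": len(lengths) - c15,
--     }
-- ===== Notes on version B (the rewrite author's own statement) =====
-- stated objective: alternative
-- what changed: Replaces the per-element if/elif bucket assignment with three separate cumulative threshold-counting passes (how many lengths are <=5, <=10, <=15) and obtains the four bucket counts by differencing these cumulative counts; no element is ever assigned to a bucket.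
import Mathlib
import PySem

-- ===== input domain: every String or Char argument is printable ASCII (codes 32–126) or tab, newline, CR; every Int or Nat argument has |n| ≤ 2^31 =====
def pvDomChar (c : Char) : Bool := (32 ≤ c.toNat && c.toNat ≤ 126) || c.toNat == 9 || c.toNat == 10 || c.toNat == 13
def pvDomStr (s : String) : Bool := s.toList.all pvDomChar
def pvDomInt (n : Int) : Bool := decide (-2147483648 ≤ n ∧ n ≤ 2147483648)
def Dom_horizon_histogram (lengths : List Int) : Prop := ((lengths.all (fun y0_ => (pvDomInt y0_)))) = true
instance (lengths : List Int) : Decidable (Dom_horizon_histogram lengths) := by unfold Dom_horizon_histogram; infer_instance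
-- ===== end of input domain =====

-- B replaces the per-element if/elif bucket assignment with three cumulative threshold
-- counting passes (#≤5, #≤10, #≤15) and obtains the buckets by differencing; objective: alternative.

-- ===== PORT A =====
def hhStepA (b : PySem.Dict String Int) (L : Int) : PySem.Dict String Int :=
  if L ≤ 5 then b.insert "1-5" (b.getD "1-5" 0 + 1)
  else if L ≤ 10 then b.insert "6-10" (b.getD "6-10" 0 + 1)
  else if L ≤ 15 then b.insert "11-15" (b.getD "11-15" 0 + 1)
  else b.insert "16+" (b.getD "16+" 0 + 1)

def horizon_histogram (lengths : List Int) : List (String × Int) :=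
  let buckets : PySem.Dict String Int :=
    PySem.Dict.ofList [("1-5", 0), ("6-10", 0), ("11-15", 0), ("16+", 0)]
  (lengths.foldl hhStepA buckets).items

-- ===== PORT B =====
def horizon_histogram_alt (lengths : List Int) : List (String × Int) :=
  let c5 : Int := lengths.countP (fun L => decide (L ≤ 5))
  let c10 : Int := lengths.countP (fun L => decide (L ≤ 10))
  let c15 : Int := lengths.countP (fun L => decide (L ≤ 15))
  [("1-5", c5), ("6-10", c10 - c5), ("11-15", c15 - c10), ("16+", (lengths.length : Int) - c15)]

-- ===== PRECONDITION & SPEC =====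
def Spec_horizon_histogram (lengths : List Int) (out : List (String × Int)) : Prop := out = horizon_histogram_alt lengths
instance (lengths : List Int) (out : List (String × Int)) : Decidable (Spec_horizon_histogram lengths out) := by unfold Spec_horizon_histogram; infer_instance

-- ===== CLAIM =====
def Claim_equal_horizon_histogram : Prop := ∀ (lengths : List Int), Dom_horizon_histogram lengths → Spec_horizon_histogram lengths (horizon_histogram lengths)

-- ===== LEMMAS AND PROOFS =====

-- A's loop from a generic dict state adds the counts of the four disjoint ranges.
lemma hh_loop_counts (ls : List Int) (a b c d : Int) :
    (ls.foldl hhStepA (PySem.Dict.mk [("1-5", a), ("6-10", b), ("11-15", c), ("16+", d)])).items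
      = [("1-5", a + (ls.countP (fun L => decide (L ≤ 5)) : Int)),
         ("6-10", b + (ls.countP (fun L => decide (5 < L) && decide (L ≤ 10)) : Int)),
         ("11-15", c + (ls.countP (fun L => decide (10 < L) && decide (L ≤ 15)) : Int)),
         ("16+", d + (ls.countP (fun L => decide (15 < L)) : Int))] := by
  induction ls generalizing a b c d with
  | nil => simp
  | cons L rest ih =>
    simp only [List.foldl_cons, List.countP_cons]
    by_cases h5 : L ≤ 5
    · have hA : hhStepA (PySem.Dict.mk [("1-5", a), ("6-10", b), ("11-15", c), ("16+", d)]) L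
          = PySem.Dict.mk [("1-5", a + 1), ("6-10", b), ("11-15", c), ("16+", d)] := by
        simp [hhStepA, h5, PySem.Dict.insert, PySem.Dict.getD, PySem.Dict.get?]
      rw [hA, ih]
      simp [h5, show ¬ (5 < L) by omega]
      omega
    · by_cases h10 : L ≤ 10
      · have hA : hhStepA (PySem.Dict.mk [("1-5", a), ("6-10", b), ("11-15", c), ("16+", d)]) L
            = PySem.Dict.mk [("1-5", a), ("6-10", b + 1), ("11-15", c), ("16+", d)] := by
          simp [hhStepA, h5, h10, PySem.Dict.insert, PySem.Dict.getD, PySem.Dict.get?]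
        rw [hA, ih]
        simp [h5, h10, show 5 < L by omega, show ¬ (10 < L) by omega, show ¬ (15 < L) by omega]
        omega
      · by_cases h15 : L ≤ 15
        · have hA : hhStepA (PySem.Dict.mk [("1-5", a), ("6-10", b), ("11-15", c), ("16+", d)]) L
              = PySem.Dict.mk [("1-5", a), ("6-10", b), ("11-15", c + 1), ("16+", d)] := by
            simp [hhStepA, h5, h10, h15, PySem.Dict.insert, PySem.Dict.getD, PySem.Dict.get?]
          rw [hA, ih]
          simp [h5, h10, h15, show 10 < L by omega, show ¬ (15 < L) by omega]
          omega
        · have hA : hhStepA (PySem.Dict.mk [("1-5", a), ("6-10", b), ("11-15", c), ("16+", d)]) L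
              = PySem.Dict.mk [("1-5", a), ("6-10", b), ("11-15", c), ("16+", d + 1)] := by
            simp [hhStepA, h5, h10, h15, PySem.Dict.insert, PySem.Dict.getD, PySem.Dict.get?]
          rw [hA, ih]
          simp [h5, h10, h15, show 15 < L by omega]
          omega

-- cumulative count splits: #(≤10) = #(≤5) + #(5<·≤10), etc.
lemma count_split10 (ls : List Int) :
    ls.countP (fun L => decide (L ≤ 10))
      = ls.countP (fun L => decide (L ≤ 5)) + ls.countP (fun L => decide (5 < L) && decide (L ≤ 10)) := by
  induction ls with
  | nil => rfl
  | cons L rest ih =>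
    simp only [List.countP_cons]
    by_cases h5 : L ≤ 5 <;> by_cases h10 : L ≤ 10 <;>
      simp [h5, h10, ih, show (5 < L) ↔ ¬ (L ≤ 5) by omega] <;> omega

lemma count_split15 (ls : List Int) :
    ls.countP (fun L => decide (L ≤ 15))
      = ls.countP (fun L => decide (L ≤ 10)) + ls.countP (fun L => decide (10 < L) && decide (L ≤ 15)) := by
  induction ls with
  | nil => rfl
  | cons L rest ih =>
    simp only [List.countP_cons]
    by_cases h10 : L ≤ 10 <;> by_cases h15 : L ≤ 15 <;>
      simp [h10, h15, ih, show (10 < L) ↔ ¬ (L ≤ 10) by omega] <;> omega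

lemma count_split_len (ls : List Int) :
    ls.length = ls.countP (fun L => decide (L ≤ 15)) + ls.countP (fun L => decide (15 < L)) := by
  induction ls with
  | nil => rfl
  | cons L rest ih =>
    simp only [List.countP_cons, List.length_cons]
    by_cases h15 : L ≤ 15 <;> simp [h15, ih, show (15 < L) ↔ ¬ (L ≤ 15) by omega] <;> omega

-- ===== VERDICT =====
theorem horizon_histogram_spec : Claim_equal_horizon_histogram := by
  intro lengths _
  show _ = _
  unfold horizon_histogram horizon_histogram_alt
  have h0 : PySem.Dict.ofList [("1-5", (0:Int)), ("6-10", 0), ("11-15", 0), ("16+", 0)]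
      = PySem.Dict.mk [("1-5", 0), ("6-10", 0), ("11-15", 0), ("16+", 0)] := by decide
  rw [h0, hh_loop_counts]
  have s10 := count_split10 lengths
  have s15 := count_split15 lengths
  have slen := count_split_len lengths
  simp only [List.cons.injEq, Prod.mk.injEq, true_and, and_true]
  refine ⟨?_, ?_, ?_, ?_⟩ <;> omega
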